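-- pv_equiv track=rewrite | github.com/gojoego/interview_prep | union_find.py | last_day_to_cross
-- ===== SOURCE A (Python) =====
-- class UnionFind5:
--     def __init__(self, N):
--         self.reps = []
--
--         for i in range(N):
--             self.reps.append(i)
--
--     def find(self, x):
--         if self.reps[x] != x:
--             self.reps[x] = self.find(self.reps[x])
--         return self.reps[x]
--
--     def union(self, v1, v2):
--         self.reps[self.find(v1)] = self.find(v2)
--
-- def last_day_to_cross(rows, cols, water_cells):
--     # initialize variable days to track number of days starting with 0
--     days = 0
--     # matrix of dimensions rows x cols initialized to 0 (all land day 0)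
--     flood_map = [[0 for _ in range(cols)] for _ in range(rows)]
--
--     # create 2 virtual nodes, 1 before first column and other after last column of matrix
--     left_node, right_node = 0, rows * cols + 1
--
--     # specify the directions where water can move
--     water_directions = [(1, 0), (0, 1), (-1, 0), (0, -1), (1, 1), (1, -1), (-1, 1), (-1, -1)]
--
--     # convert water cells from 1 based to 0 based array for convenience
--     water_cells = [(r - 1, c - 1) for r, c in water_cells]
--
--     # initialize Union Find object to create disjoint set union ds, array - parents
--     water_connectivity = UnionFind5(rows * cols + 2)
--
--     # start filling matrix with water cells as per given water_cells array
--     for row, column in water_cells: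
--         flood_map[row][column] = 1
--
--         # each time cell flooded, check if it can connect with any existing water cells
--         for row_dir, col_dir in water_directions:
--             # after connecting recently added water cell to existing water cells, check if
--             # we get single connected component of water cells from leftmost to rightmost side of matrix
--             if within_bounds(row + row_dir, column + col_dir, rows, cols) \
--             and flood_map[row + row_dir][column + col_dir] == 1:
--                 water_connectivity.union(find_index(row, column, cols), find_index((row + row_dir), (column + col_dir), cols))
--         if column == 0:
--             water_connectivity.union(find_index(row, column, cols), left_node)
--         if column == cols - 1:
--             water_connectivity.union(find_index(row, column, cols), right_node)
--
--         # if there exists series of connected water cells, stop and return current value of days as final output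
--         if water_connectivity.find(left_node) == water_connectivity.find(right_node):
--             break
--         days += 1
--
--     # otherwise, still able to cross matrix top to bottom, increment value of days
--     # repeat process for next cell to be flooded
--
--     return days
--
-- def within_bounds(row, col, rows, cols):
--     if not (0 <= col < cols): return False
--     if not (0 <= row < rows): return False
--     return True
--
-- def find_index(current_row, current_column, columns):
--     return current_row * columns + (current_column + 1)
-- ===== SOURCE B (Python) =====
-- # B: quick-find relabel array driven by a per-day list of merge targets computed up front
-- # (no union-find trees, no recursion); the crossing test is a direct comp[0]==comp[n+1] read.
-- # Alternative data structure / two-phase decomposition, not claimed faster.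
--
-- DIRS8 = ((1, 0), (0, 1), (-1, 0), (0, -1), (1, 1), (1, -1), (-1, 1), (-1, -1))
--
-- def merge_targets(rows, cols, wet, r0, c0):
--     ts = [nr * cols + nc + 1
--           for nr, nc in ((r0 + dr, c0 + dc) for dr, dc in DIRS8)
--           if 0 <= nr < rows and 0 <= nc < cols and wet[nr][nc]]
--     if c0 == 0:
--         ts.append(0)
--     if c0 == cols - 1:
--         ts.append(rows * cols + 1)
--     return ts
--
-- def relabelled(comp, a, b):
--     ra, rb = comp[a], comp[b]
--     return comp if ra == rb else [rb if x == ra else x for x in comp]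
--
-- def last_day_to_cross(rows, cols, water_cells):
--     n = rows * cols
--     comp = list(range(n + 2))
--     wet = [[False] * cols for _ in range(rows)]
--     for day, (r, c) in enumerate(water_cells):
--         r0, c0 = r - 1, c - 1
--         wet[r0][c0] = True
--         for t in merge_targets(rows, cols, wet, r0, c0):
--             comp = relabelled(comp, r0 * cols + c0 + 1, t)
--         if comp[0] == comp[n + 1]:
--             return day
--     return len(water_cells)
-- ===== Notes on version B (the rewrite author's own statement) =====
-- stated objective: alternative
-- what changed: Replaced A's interleaved recursive path-compressed union-find (two find() calls and in-loop union calls per day) by a two-phase quick-find: each day first computes the complete list of merge targets (wet 8-neighbours plus boundary nodes) by a comprehension, then folds a pure relabelling of a flat representative array over that list, ending with a direct comp[0]==comp[n+1] read.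
-- outside the precondition, e.g. on last_day_to_cross(2, 2, [(3, 1)]): A raises IndexError, B raises IndexError; on last_day_to_cross(1, 5, [(0, -4), (1, 5), (1, 1)]): A returns 3, B returns 3
import Mathlib
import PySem

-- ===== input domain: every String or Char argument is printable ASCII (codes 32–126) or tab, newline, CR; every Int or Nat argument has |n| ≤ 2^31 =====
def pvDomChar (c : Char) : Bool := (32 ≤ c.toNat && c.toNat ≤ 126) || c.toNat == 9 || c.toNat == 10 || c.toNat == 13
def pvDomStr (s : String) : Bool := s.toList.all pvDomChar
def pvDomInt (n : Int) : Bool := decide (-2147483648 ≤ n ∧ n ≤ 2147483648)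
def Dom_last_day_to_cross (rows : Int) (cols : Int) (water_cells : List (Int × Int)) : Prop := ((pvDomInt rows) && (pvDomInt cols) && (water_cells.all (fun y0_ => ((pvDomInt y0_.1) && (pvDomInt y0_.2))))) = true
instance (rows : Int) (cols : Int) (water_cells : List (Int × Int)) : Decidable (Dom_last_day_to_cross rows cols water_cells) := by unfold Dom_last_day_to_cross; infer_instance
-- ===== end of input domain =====

-- B replaces A's interleaved recursive path-compressed union-find by a two-phase quick-find:
-- per day it first computes the full list of merge targets, then folds a pure relabelling of a
-- flat representative array over it. Same return value on Pre_; alternative, not claimed faster.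

-- ===== PORT A =====
def within_bounds (row : Int) (col : Int) (rows : Int) (cols : Int) : Bool :=
  if ¬ (0 ≤ col ∧ col < cols) then false
  else if ¬ (0 ≤ row ∧ row < rows) then false
  else true

def find_index (current_row : Int) (current_column : Int) (columns : Int) : Int :=
  current_row * columns + (current_column + 1)

-- UnionFind5.find with fuel (Python recursion; fuel = array length always suffices on reachable states)
def ufFind : Nat → List Int → Int → Option (List Int × Int)
  | 0, _, _ => none
  | f + 1, reps, x =>
    match PySem.List.pyGet? reps x with
    | none => none
    | some p =>
      if p ≠ x then
        match ufFind f reps p with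
        | none => none
        | some (reps1, r) =>
          match PySem.List.pySet? reps1 x r with
          | none => none
          | some reps2 => some (reps2, r)
      else some (reps, x)

-- UnionFind5.union: Python evaluates the RHS find(v2) first, then the target index find(v1)
def ufUnion (reps : List Int) (v1 : Int) (v2 : Int) : Option (List Int) :=
  match ufFind reps.length reps v2 with
  | none => none
  | some (reps1, r2) =>
    match ufFind reps1.length reps1 v1 with
    | none => none
    | some (reps2, r1) => PySem.List.pySet? reps2 r1 r2

def water_directions : List (Int × Int) :=
  [(1, 0), (0, 1), (-1, 0), (0, -1), (1, 1), (1, -1), (-1, 1), (-1, -1)]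

def floodRead (flood : List (List Int)) (r : Int) (c : Int) : Option Int :=
  match PySem.List.pyGet? flood r with
  | none => none
  | some rowl => PySem.List.pyGet? rowl c

def floodWrite (flood : List (List Int)) (r : Int) (c : Int) (v : Int) : Option (List (List Int)) :=
  match PySem.List.pyGet? flood r with
  | none => none
  | some rowl =>
    match PySem.List.pySet? rowl c v with
    | none => none
    | some rowl' => PySem.List.pySet? flood r rowl'

def dirStep (rows : Int) (cols : Int) (flood : List (List Int)) (row : Int) (col : Int)
    (acc : Option (List Int)) (d : Int × Int) : Option (List Int) :=
  match acc with
  | none => none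
  | some reps =>
    if within_bounds (row + d.1) (col + d.2) rows cols then
      match floodRead flood (row + d.1) (col + d.2) with
      | none => none
      | some v =>
        if v = 1 then
          ufUnion reps (find_index row col cols) (find_index (row + d.1) (col + d.2) cols)
        else some reps
    else some reps

def loopA (rows : Int) (cols : Int) : List (Int × Int) → Int → List (List Int) → List Int → Option Int
  | [], days, _, _ => some days
  | (row, col) :: rest, days, flood, reps =>
    match floodWrite flood row col 1 with
    | none => none
    | some flood1 =>
      match water_directions.foldl (dirStep rows cols flood1 row col) (some reps) with
      | none => none
      | some reps1 =>
        match (if col = 0 then ufUnion reps1 (find_index row col cols) 0 else some reps1) with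
        | none => none
        | some reps2 =>
          match (if col = cols - 1 then ufUnion reps2 (find_index row col cols) (rows * cols + 1) else some reps2) with
          | none => none
          | some reps3 =>
            match ufFind reps3.length reps3 0 with
            | none => none
            | some (reps4, rl) =>
              match ufFind reps4.length reps4 (rows * cols + 1) with
              | none => none
              | some (reps5, rr) =>
                if rl = rr then some days
                else loopA rows cols rest (days + 1) flood1 reps5

def last_day_to_cross (rows : Int) (cols : Int) (water_cells : List (Int × Int)) : Int :=
  let flood0 := (PySem.List.pyRange 0 rows 1).map (fun _ => (PySem.List.pyRange 0 cols 1).map (fun _ => (0 : Int)))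
  let cells := water_cells.map (fun p => (p.1 - 1, p.2 - 1))
  let reps0 := PySem.List.pyRange 0 (rows * cols + 2) 1
  (loopA rows cols cells 0 flood0 reps0).getD 0

-- ===== PORT B =====
def dirs8 : List (Int × Int) :=
  [(1, 0), (0, 1), (-1, 0), (0, -1), (1, 1), (1, -1), (-1, 1), (-1, -1)]

-- the comprehension's guard: in-bounds and wet (wet reads are always in range here)
def wetAt (rows : Int) (cols : Int) (wet : List (List Bool)) (p : Int × Int) : Bool :=
  decide (0 ≤ p.1) && decide (p.1 < rows) && decide (0 ≤ p.2) && decide (p.2 < cols) &&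
    (wet.getD p.1.toNat []).getD p.2.toNat false

def merge_targets (rows : Int) (cols : Int) (wet : List (List Bool)) (r0 : Int) (c0 : Int) : List Int :=
  ((dirs8.map (fun d => (r0 + d.1, c0 + d.2))).filter (wetAt rows cols wet)).map
      (fun p => p.1 * cols + p.2 + 1)
    ++ (if c0 = 0 then [(0 : Int)] else [])
    ++ (if c0 = cols - 1 then [rows * cols + 1] else [])

def relabelled (comp : List Int) (a : Int) (b : Int) : Option (List Int) :=
  match PySem.List.pyGet? comp a, PySem.List.pyGet? comp b with
  | some ra, some rb =>
      some (if ra = rb then comp else comp.map (fun x => if x = ra then rb else x))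
  | _, _ => none

def wetSet (wet : List (List Bool)) (r0 : Int) (c0 : Int) : Option (List (List Bool)) :=
  (PySem.List.pyGet? wet r0).bind fun row =>
    (PySem.List.pySet? row c0 true).bind fun row' =>
      PySem.List.pySet? wet r0 row'

def runDays (rows : Int) (cols : Int) : List (Int × Int) → Int → List (List Bool) → List Int → Option Int
  | [], day, _, _ => some day
  | (r, c) :: rest, day, wet, comp =>
    (wetSet wet (r - 1) (c - 1)).bind fun wet' =>
      ((merge_targets rows cols wet' (r - 1) (c - 1)).foldl
          (fun acc t => acc.bind fun cm => relabelled cm ((r - 1) * cols + (c - 1) + 1) t)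
          (some comp)).bind fun comp' =>
        (PySem.List.pyGet? comp' 0).bind fun lft =>
          (PySem.List.pyGet? comp' (rows * cols + 1)).bind fun rgt =>
            if lft = rgt then some day else runDays rows cols rest (day + 1) wet' comp'

def last_day_to_cross_alt (rows : Int) (cols : Int) (water_cells : List (Int × Int)) : Int :=
  (runDays rows cols water_cells 0
      (List.replicate rows.toNat (List.replicate cols.toNat false))
      ((List.range (rows * cols + 2).toNat).map Int.ofNat)).getD 0

-- ===== PRECONDITION & SPEC =====
-- Pre_ excludes exactly the inputs on which A raises IndexError: a cell beyond the grid
-- (r > rows or c > cols or below Python's negative-wrap range), a nonempty water list on an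
-- empty grid, or a far-negative cell whose union-find node index r0*cols+c0+1 falls outside
-- the reps array; the raise depends on execution order, so Pre_ excludes such cells conservatively
-- (a few inputs where A happens to break before reaching the bad cell are excluded too).
def Pre_last_day_to_cross (rows : Int) (cols : Int) (water_cells : List (Int × Int)) : Prop :=
  ∀ p ∈ water_cells, 1 - rows ≤ p.1 ∧ p.1 ≤ rows ∧ 1 - cols ≤ p.2 ∧ p.2 ≤ cols ∧
    -(rows * cols + 2) ≤ (p.1 - 1) * cols + (p.2 - 1) + 1
instance (rows : Int) (cols : Int) (water_cells : List (Int × Int)) : Decidable (Pre_last_day_to_cross rows cols water_cells) := by unfold Pre_last_day_to_cross; infer_instance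

def pvWitness_last_day_to_cross : Int × Int × (List (Int × Int)) := (2, 2, [(1, 1), (2, 2), (1, 2)])

def Spec_last_day_to_cross (rows : Int) (cols : Int) (water_cells : List (Int × Int)) (out : Int) : Prop := out = last_day_to_cross_alt rows cols water_cells
instance (rows : Int) (cols : Int) (water_cells : List (Int × Int)) (out : Int) : Decidable (Spec_last_day_to_cross rows cols water_cells out) := by unfold Spec_last_day_to_cross; infer_instance

-- ===== CLAIM (what is proved, stated in full; the proofs are below) =====
def Claim_equal_last_day_to_cross : Prop := ∀ (rows : Int) (cols : Int) (water_cells : List (Int × Int)), Dom_last_day_to_cross rows cols water_cells → Pre_last_day_to_cross rows cols water_cells → Spec_last_day_to_cross rows cols water_cells (last_day_to_cross rows cols water_cells)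

-- ===== LEMMAS AND PROOFS =====
-- ===== proof infrastructure =====

def rootGo : Nat → List Int → Int → Option Int
  | 0, _, _ => none
  | f + 1, reps, x =>
    match PySem.List.pyGet? reps x with
    | none => none
    | some p => if p = x then some x else rootGo f reps p

def Reach (reps : List Int) (x r : Int) : Prop := ∃ f, rootGo f reps x = some r

def EntOk (N : Nat) (reps : List Int) : Prop :=
  reps.length = N ∧ ∀ p ∈ reps, 0 ≤ p ∧ p < (N : Int)

def Cert (N : Nat) (reps : List Int) (d : Int → Nat) : Prop :=
  ∀ x p : Int, 0 ≤ x → x < (N : Int) → PySem.List.pyGet? reps x = some p → p = x ∨ d p < d x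

-- basic index facts
theorem pyGet?_nonneg_lt {α : Type} {xs : List α} {i : Int} (h0 : 0 ≤ i) (h1 : i < (xs.length : Int)) :
    PySem.List.pyGet? xs i = some (xs[i.toNat]'(by omega)) := by
  rw [PySem.List.pyGet?_of_nonneg _ h0]
  exact List.getElem?_eq_getElem (by omega)

theorem pySet?_nonneg_lt {α : Type} {xs : List α} {i : Int} (v : α) (h0 : 0 ≤ i) (h1 : i < (xs.length : Int)) :
    PySem.List.pySet? xs i v = some (xs.set i.toNat v) := by
  have h := PySem.List.pySet?_natCast xs i.toNat v (by omega)
  rwa [show ((i.toNat : Nat) : Int) = i by omega] at h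

theorem entOk_get {N : Nat} {reps : List Int} (hE : EntOk N reps) {x p : Int}
    (h0 : 0 ≤ x) (h1 : x < (N : Int)) (hg : PySem.List.pyGet? reps x = some p) :
    0 ≤ p ∧ p < (N : Int) :=
  hE.2 p (PySem.List.mem_of_pyGet?_eq_some _ hg)

theorem entOk_get_some {N : Nat} {reps : List Int} (hE : EntOk N reps) {x : Int}
    (h0 : 0 ≤ x) (h1 : x < (N : Int)) :
    ∃ p, PySem.List.pyGet? reps x = some p ∧ 0 ≤ p ∧ p < (N : Int) := by
  have hx : x < (reps.length : Int) := by rw [hE.1]; exact h1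
  refine ⟨_, pyGet?_nonneg_lt h0 hx, ?_⟩
  exact hE.2 _ (List.getElem_mem _)

theorem rootGo_mono {f g : Nat} {reps : List Int} {x v : Int}
    (h : rootGo f reps x = some v) (hfg : f ≤ g) : rootGo g reps x = some v := by
  induction f generalizing x g with
  | zero => simp [rootGo] at h
  | succ f ih =>
    obtain ⟨g', rfl⟩ : ∃ g', g = g' + 1 := ⟨g - 1, by omega⟩
    simp only [rootGo] at h ⊢
    cases hg : PySem.List.pyGet? reps x with
    | none => rw [hg] at h; exact absurd h (by simp)
    | some p =>
      rw [hg] at h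
      by_cases hp : p = x
      · simpa [hp] using h
      · simp only [hp, if_false] at h ⊢
        exact ih h (by omega)

theorem reach_det {reps : List Int} {x v w : Int}
    (hv : Reach reps x v) (hw : Reach reps x w) : v = w := by
  obtain ⟨f, hf⟩ := hv; obtain ⟨g, hg⟩ := hw
  have h1 := rootGo_mono hf (Nat.le_max_left f g)
  have h2 := rootGo_mono hg (Nat.le_max_right f g)
  rw [h1] at h2; exact Option.some_inj.mp h2

theorem rootGo_isRoot {f : Nat} {reps : List Int} {x v : Int}
    (h : rootGo f reps x = some v) : PySem.List.pyGet? reps v = some v := by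
  induction f generalizing x with
  | zero => simp [rootGo] at h
  | succ f ih =>
    simp only [rootGo] at h
    cases hg : PySem.List.pyGet? reps x with
    | none => rw [hg] at h; exact absurd h (by simp)
    | some p =>
      rw [hg] at h
      by_cases hp : p = x
      · simp only [hp, if_pos rfl] at h
        obtain rfl := Option.some_inj.mp h
        rwa [hp] at hg
      · simp only [hp, if_false] at h; exact ih h

theorem reach_root {reps : List Int} {v : Int}
    (h : PySem.List.pyGet? reps v = some v) : Reach reps v v :=
  ⟨1, by simp [rootGo, h]⟩

theorem reach_step {reps : List Int} {x p v : Int}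
    (hg : PySem.List.pyGet? reps x = some p) (hne : p ≠ x)
    (h : Reach reps p v) : Reach reps x v := by
  obtain ⟨f, hf⟩ := h
  exact ⟨f + 1, by simp [rootGo, hg, hne, hf]⟩

theorem reach_unstep {reps : List Int} {x p v : Int}
    (hg : PySem.List.pyGet? reps x = some p) (hne : p ≠ x)
    (h : Reach reps x v) : Reach reps p v := by
  obtain ⟨f, hf⟩ := h
  cases f with
  | zero => simp [rootGo] at hf
  | succ f => simp only [rootGo, hg, hne, if_false] at hf; exact ⟨f, hf⟩

theorem rootGo_val_mem {f : Nat} {reps : List Int} {x v : Int}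
    (h : rootGo f reps x = some v) : v = x ∨ v ∈ reps := by
  induction f generalizing x with
  | zero => simp [rootGo] at h
  | succ f ih =>
    simp only [rootGo] at h
    cases hg : PySem.List.pyGet? reps x with
    | none => rw [hg] at h; exact absurd h (by simp)
    | some p =>
      rw [hg] at h
      by_cases hp : p = x
      · simp only [hp, if_pos rfl] at h; exact Or.inl (Option.some_inj.mp h).symm
      · simp only [hp, if_false] at h
        rcases ih h with h1 | h1
        · exact Or.inr (h1 ▸ PySem.List.mem_of_pyGet?_eq_some _ hg)
        · exact Or.inr h1

theorem cert_reach_lt {N : Nat} {reps : List Int} {d : Int → Nat}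
    (hE : EntOk N reps) (hC : Cert N reps d) {f : Nat} {x v : Int}
    (h0 : 0 ≤ x) (h1 : x < (N : Int)) (h : rootGo f reps x = some v) :
    v = x ∨ d v < d x := by
  induction f generalizing x with
  | zero => simp [rootGo] at h
  | succ f ih =>
    simp only [rootGo] at h
    cases hg : PySem.List.pyGet? reps x with
    | none => rw [hg] at h; exact absurd h (by simp)
    | some p =>
      rw [hg] at h
      by_cases hp : p = x
      · simp only [hp, if_pos rfl] at h; exact Or.inl (Option.some_inj.mp h).symm
      · simp only [hp, if_false] at h
        have hpr := entOk_get hE h0 h1 hg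
        have := ih hpr.1 hpr.2 h
        rcases hC x p h0 h1 hg with h2 | h2
        · exact absurd h2 hp
        · rcases this with rfl | h3
          · exact Or.inr h2
          · exact Or.inr (lt_trans h3 h2)

-- pigeonhole: a certificate forces rootGo to terminate within N = reps.length steps
theorem rootGo_of_cert {N : Nat} {reps : List Int} {d : Int → Nat}
    (hE : EntOk N reps) (hC : Cert N reps d) {x : Int}
    (h0 : 0 ≤ x) (h1 : x < (N : Int)) : ∃ r, rootGo N reps x = some r := by
  classical
  set m : Int → Nat := fun y => ((Finset.Icc (0 : Int) ((N : Int) - 1)).filter (fun y' => d y' ≤ d y)).card with hm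
  have hmem : ∀ y : Int, 0 ≤ y → y < (N : Int) → y ∈ (Finset.Icc (0 : Int) ((N : Int) - 1)).filter (fun y' => d y' ≤ d y) := by
    intro y hy0 hy1
    simp only [Finset.mem_filter, Finset.mem_Icc]
    exact ⟨⟨hy0, by omega⟩, le_refl _⟩
  have hbound : ∀ y : Int, m y ≤ N := by
    intro y
    calc m y ≤ (Finset.Icc (0 : Int) ((N : Int) - 1)).card := Finset.card_filter_le _ _
    _ = N := by rw [Int.card_Icc]; omega
  have key : ∀ n : Nat, ∀ y : Int, 0 ≤ y → y < (N : Int) → m y ≤ n → ∃ r, rootGo (m y) reps y = some r := by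
    intro n
    induction n with
    | zero =>
      intro y hy0 hy1 hmn
      have hpos : 1 ≤ m y := by
        have := Finset.card_pos.mpr ⟨y, hmem y hy0 hy1⟩
        simpa [hm] using this
      omega
    | succ n ih =>
      intro y hy0 hy1 hmn
      have hpos : 1 ≤ m y := by
        have := Finset.card_pos.mpr ⟨y, hmem y hy0 hy1⟩
        simpa [hm] using this
      obtain ⟨p, hg, hp0, hp1⟩ := entOk_get_some hE hy0 hy1
      by_cases hp : p = y
      · exact ⟨y, by
          obtain ⟨k, hk⟩ : ∃ k, m y = k + 1 := ⟨m y - 1, by omega⟩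
          rw [hk]; simp [rootGo, hg, hp]⟩
      · have hd : d p < d y := by
          rcases hC y p hy0 hy1 hg with h | h
          · exact absurd h hp
          · exact h
        have hsub : (Finset.Icc (0 : Int) ((N : Int) - 1)).filter (fun y' => d y' ≤ d p) ⊂
            (Finset.Icc (0 : Int) ((N : Int) - 1)).filter (fun y' => d y' ≤ d y) := by
          constructor
          · intro z hz
            simp only [Finset.mem_filter] at hz ⊢
            exact ⟨hz.1, le_trans hz.2 (le_of_lt hd)⟩
          · intro hcon
            have := hcon (hmem y hy0 hy1)
            simp only [Finset.mem_filter] at this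
            omega
        have hlt : m p < m y := Finset.card_lt_card hsub
        obtain ⟨r, hr⟩ := ih p hp0 hp1 (by omega)
        refine ⟨r, ?_⟩
        obtain ⟨k, hk⟩ : ∃ k, m y = k + 1 := ⟨m y - 1, by omega⟩
        rw [hk]
        simp only [rootGo, hg, hp, if_false]
        exact rootGo_mono hr (by omega)
  obtain ⟨r, hr⟩ := key N x h0 h1 (hbound x)
  exact ⟨r, rootGo_mono hr (hbound x)⟩

theorem pyGet?_set_self {α : Type} {xs : List α} {i : Int} (v : α) (h0 : 0 ≤ i) (h1 : i < (xs.length : Int)) :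
    PySem.List.pyGet? (xs.set i.toNat v) i = some v := by
  rw [PySem.List.pyGet?_of_nonneg _ h0]
  rw [List.getElem?_set_self (by simpa using (by omega : i.toNat < xs.length))]

theorem pyGet?_set_ne {α : Type} {xs : List α} {i j : Int} (v : α) (hi0 : 0 ≤ i) (hj0 : 0 ≤ j) (hne : j ≠ i) :
    PySem.List.pyGet? (xs.set i.toNat v) j = PySem.List.pyGet? xs j := by
  rw [PySem.List.pyGet?_of_nonneg _ hj0, PySem.List.pyGet?_of_nonneg _ hj0]
  rw [List.getElem?_set_ne (by omega)]

theorem set_root_entOk {N : Nat} {reps : List Int} {x r : Int}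
    (hE : EntOk N reps) (hr0 : 0 ≤ r) (hr1 : r < (N : Int)) :
    EntOk N (reps.set x.toNat r) := by
  refine ⟨by simpa using hE.1, ?_⟩
  intro p hp
  rcases List.mem_or_eq_of_mem_set hp with h | rfl
  · exact hE.2 p h
  · exact ⟨hr0, hr1⟩

theorem rootGo_eq {f : Nat} {reps : List Int} {x p : Int}
    (h : PySem.List.pyGet? reps x = some p) :
    rootGo (f + 1) reps x = if p = x then some x else rootGo f reps p := by
  simp [rootGo, h]

theorem rootGo_none {f : Nat} {reps : List Int} {x : Int}
    (h : PySem.List.pyGet? reps x = none) : rootGo (f + 1) reps x = none := by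
  simp [rootGo, h]

theorem set_root_preserve {N : Nat} {reps : List Int} {x r : Int}
    (hE : EntOk N reps) (hx0 : 0 ≤ x) (hx1 : x < (N : Int))
    (hroot : Reach reps x r) :
    ∀ f (y v : Int), 0 ≤ y → rootGo f reps y = some v →
      rootGo f (reps.set x.toNat r) y = some v := by
  have hlen : (reps.length : Int) = (N : Int) := by rw [hE.1]
  intro f
  induction f with
  | zero => intro y v _ h; simp [rootGo] at h
  | succ f ih =>
    intro y v hy0 h
    cases hg : PySem.List.pyGet? reps y with
    | none => rw [rootGo_none hg] at h; exact absurd h (by simp)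
    | some p =>
      rw [rootGo_eq hg] at h
      by_cases hyx : y = x
      · subst hyx
        have hv : v = r := by
          refine reach_det ⟨f + 1, ?_⟩ hroot
          rw [rootGo_eq hg]; exact h
        rw [hv] at h ⊢
        rw [rootGo_eq (pyGet?_set_self (xs := reps) r hx0 (by omega))]
        by_cases hry : r = y
        · simp [hry]
        · rw [if_neg hry]
          by_cases hpy : p = y
          · rw [if_pos hpy] at h
            exact absurd (Option.some_inj.mp h).symm hry
          · rw [if_neg hpy] at h
            cases f with
            | zero => simp [rootGo] at h
            | succ f' =>
              have hgr : PySem.List.pyGet? reps r = some r := rootGo_isRoot h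
              have hr0 : 0 ≤ r := (hE.2 r (PySem.List.mem_of_pyGet?_eq_some _ hgr)).1
              rw [rootGo_eq (show PySem.List.pyGet? (reps.set y.toNat r) r = some r by
                rw [pyGet?_set_ne r hx0 hr0 hry]; exact hgr)]
              simp
      · rw [rootGo_eq (show PySem.List.pyGet? (reps.set x.toNat r) y = some p by
          rw [pyGet?_set_ne r hx0 hy0 hyx]; exact hg)]
        by_cases hpy : p = y
        · rw [if_pos hpy] at h ⊢; exact h
        · rw [if_neg hpy] at h ⊢
          have hp0 : 0 ≤ p := (hE.2 p (PySem.List.mem_of_pyGet?_eq_some _ hg)).1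
          exact ih p v hp0 h

theorem set_root_cert {N : Nat} {reps : List Int} {x r : Int} {d : Int → Nat}
    (hE : EntOk N reps) (hC : Cert N reps d) (hx0 : 0 ≤ x) (hx1 : x < (N : Int))
    (hroot : Reach reps x r) :
    Cert N (reps.set x.toNat r) d := by
  intro z p hz0 hz1 hg
  by_cases hzx : z = x
  · subst hzx
    rw [pyGet?_set_self r hx0 (by rw [hE.1]; omega)] at hg
    obtain rfl := Option.some_inj.mp hg
    obtain ⟨f, hf⟩ := hroot
    exact cert_reach_lt hE hC hz0 hz1 hf
  · rw [pyGet?_set_ne r hx0 hz0 hzx] at hg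
    exact hC z p hz0 hz1 hg

theorem ufFind_eq {f : Nat} {reps : List Int} {x p : Int}
    (h : PySem.List.pyGet? reps x = some p) :
    ufFind (f + 1) reps x =
      if p ≠ x then
        match ufFind f reps p with
        | none => none
        | some (reps1, r) =>
          match PySem.List.pySet? reps1 x r with
          | none => none
          | some reps2 => some (reps2, r)
      else some (reps, x) := by
  simp [ufFind, h]

theorem ufFind_go {N : Nat} :
    ∀ (f : Nat) (reps : List Int) (x r : Int), EntOk N reps → (∃ d, Cert N reps d) →
      0 ≤ x → x < (N : Int) → rootGo f reps x = some r →
      ∃ reps', ufFind f reps x = some (reps', r) ∧ EntOk N reps' ∧ (∃ d, Cert N reps' d) ∧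
        (∀ y v, 0 ≤ y → Reach reps y v → Reach reps' y v) := by
  intro f
  induction f with
  | zero => intro reps x r _ _ _ _ h; simp [rootGo] at h
  | succ f ih =>
    intro reps x r hE hC hx0 hx1 h
    have horig : rootGo (f + 1) reps x = some r := h
    cases hg : PySem.List.pyGet? reps x with
    | none => rw [rootGo_none hg] at h; exact absurd h (by simp)
    | some p =>
      rw [rootGo_eq hg] at h
      by_cases hpx : p = x
      · rw [if_pos hpx] at h
        obtain rfl := Option.some_inj.mp h
        refine ⟨reps, ?_, hE, hC, fun y v _ hv => hv⟩
        rw [ufFind_eq hg]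
        simp [hpx]
      · rw [if_neg hpx] at h
        have hp := hE.2 p (PySem.List.mem_of_pyGet?_eq_some _ hg)
        obtain ⟨reps1, heq1, hE1, hC1, P1⟩ := ih reps p r hE hC hp.1 hp.2 h
        have hr : 0 ≤ r ∧ r < (N : Int) := by
          rcases rootGo_val_mem horig with rfl | hmem
          · exact ⟨hx0, hx1⟩
          · exact hE.2 r hmem
        have hreach1 : Reach reps1 x r := P1 x r hx0 ⟨f + 1, horig⟩
        have hset : PySem.List.pySet? reps1 x r = some (reps1.set x.toNat r) :=
          pySet?_nonneg_lt r hx0 (by rw [hE1.1]; omega)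
        obtain ⟨d1, hd1⟩ := hC1
        refine ⟨reps1.set x.toNat r, ?_, set_root_entOk hE1 hr.1 hr.2,
          ⟨d1, set_root_cert hE1 hd1 hx0 hx1 hreach1⟩, ?_⟩
        · simp [ufFind_eq hg, hpx, heq1, hset]
        · intro y v hy0 hv
          obtain ⟨g, hgv⟩ := P1 y v hy0 hv
          exact ⟨g, set_root_preserve hE1 hx0 hx1 hreach1 g y v hy0 hgv⟩

theorem hang_reach {N : Nat} {reps : List Int} {r1 r2 : Int}
    (hE : EntOk N reps)
    (h10 : 0 ≤ r1) (h11 : r1 < (N : Int)) (h20 : 0 ≤ r2) (h21 : r2 < (N : Int))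
    (hg1 : PySem.List.pyGet? reps r1 = some r1) (hg2 : PySem.List.pyGet? reps r2 = some r2) :
    ∀ (f : Nat) (y v : Int), 0 ≤ y → rootGo f reps y = some v →
      Reach (reps.set r1.toNat r2) y (if v = r1 then r2 else v) := by
  have hlen : (reps.length : Int) = (N : Int) := by rw [hE.1]
  intro f
  induction f with
  | zero => intro y v _ h; simp [rootGo] at h
  | succ f ih =>
    intro y v hy0 h
    cases hg : PySem.List.pyGet? reps y with
    | none => rw [rootGo_none hg] at h; exact absurd h (by simp)
    | some p =>
      rw [rootGo_eq hg] at h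
      by_cases hpy : p = y
      · rw [if_pos hpy] at h
        obtain rfl : y = v := Option.some_inj.mp h
        by_cases hyr : y = r1
        · rw [if_pos hyr]
          subst hyr
          by_cases hrr : r2 = y
          · rw [hrr]
            refine reach_root ?_
            have hss := pyGet?_set_self (xs := reps) r2 h10 (by omega)
            rwa [hrr] at hss
          · refine reach_step (pyGet?_set_self (xs := reps) r2 h10 (by omega)) hrr ?_
            refine reach_root ?_
            rw [pyGet?_set_ne r2 h10 h20 hrr]
            exact hg2
        · rw [if_neg hyr]
          refine reach_root ?_
          rw [pyGet?_set_ne r2 h10 hy0 hyr]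
          rw [hpy] at hg
          exact hg
      · rw [if_neg hpy] at h
        have hyr : y ≠ r1 := by
          intro hc; subst hc
          rw [hg1] at hg
          exact hpy (Option.some_inj.mp hg).symm
        have hp0 : 0 ≤ p := (hE.2 p (PySem.List.mem_of_pyGet?_eq_some _ hg)).1
        refine reach_step (show PySem.List.pyGet? (reps.set r1.toNat r2) y = some p by
          rw [pyGet?_set_ne r2 h10 hy0 hyr]; exact hg) hpy (ih p v hp0 h)

theorem hang_cert {N : Nat} {reps : List Int} {r1 r2 : Int} {d : Int → Nat}
    (hE : EntOk N reps) (hC : Cert N reps d)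
    (h10 : 0 ≤ r1) (h11 : r1 < (N : Int)) (h20 : 0 ≤ r2)
    (hg1 : PySem.List.pyGet? reps r1 = some r1) (hg2 : PySem.List.pyGet? reps r2 = some r2) :
    ∃ d', Cert N (reps.set r1.toNat r2) d' := by
  refine ⟨fun z => @dite _ (Reach reps z r1) (Classical.propDecidable _)
    (fun _ => d z + d r2 + 1) (fun _ => d z), ?_⟩
  intro z p hz0 hz1 hg
  beta_reduce
  by_cases hzr : z = r1
  · have hp : p = r2 := by
      rw [hzr, pyGet?_set_self r2 h10 (by rw [hE.1]; omega)] at hg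
      exact (Option.some_inj.mp hg).symm
    by_cases hpz : p = z
    · exact Or.inl hpz
    · refine Or.inr ?_
      have hz_reach : Reach reps z r1 := by rw [hzr]; exact reach_root hg1
      have hp_not : ¬ Reach reps p r1 := by
        intro hc
        rw [hp] at hc
        have := reach_det hc (reach_root hg2)
        rw [hzr] at hpz
        exact hpz (hp.trans this.symm)
      rw [dif_neg hp_not, dif_pos hz_reach, hp]
      omega
  · rw [pyGet?_set_ne r2 h10 hz0 hzr] at hg
    by_cases hpz : p = z
    · exact Or.inl hpz
    · refine Or.inr ?_
      have hd : d p < d z := by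
        rcases hC z p hz0 hz1 hg with h | h
        · exact absurd h hpz
        · exact h
      have hiff : Reach reps p r1 ↔ Reach reps z r1 :=
        ⟨fun h => reach_step hg hpz h, fun h => reach_unstep hg hpz h⟩
      by_cases hzr1 : Reach reps z r1
      · rw [dif_pos (hiff.mpr hzr1), dif_pos hzr1]; omega
      · rw [dif_neg (fun h => hzr1 (hiff.mp h)), dif_neg hzr1]; omega


-- wrapped (negative) Python indices
def wrapNode (N : Nat) (a : Int) : Int := if a < 0 then a + N else a

theorem pyIdx?_wrap {n : Nat} {i : Int} (h0 : -(n : Int) ≤ i) (h1 : i < 0) :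
    PySem.List.pyIdx? n i = PySem.List.pyIdx? n (i + n) := by
  simp only [PySem.List.pyIdx?]
  split_ifs <;> try omega
  all_goals congr 1; omega

theorem pyGet?_wrap {α : Type} {xs : List α} {i : Int} (h0 : -(xs.length : Int) ≤ i) (h1 : i < 0) :
    PySem.List.pyGet? xs i = PySem.List.pyGet? xs (i + xs.length) := by
  simp only [PySem.List.pyGet?, pyIdx?_wrap h0 h1]

theorem pySet?_wrap {α : Type} {xs : List α} {i : Int} (v : α) (h0 : -(xs.length : Int) ≤ i) (h1 : i < 0) :
    PySem.List.pySet? xs i v = PySem.List.pySet? xs (i + xs.length) v := by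
  simp only [PySem.List.pySet?, pyIdx?_wrap h0 h1]

theorem pyGet?_map' {α β : Type} (f : α → β) (xs : List α) (i : Int) :
    PySem.List.pyGet? (xs.map f) i = (PySem.List.pyGet? xs i).map f := by
  simp only [PySem.List.pyGet?, List.length_map]
  cases PySem.List.pyIdx? xs.length i <;> simp

theorem pySet?_map {α β : Type} (f : α → β) (xs : List α) (i : Int) (v : α) :
    PySem.List.pySet? (xs.map f) i (f v) = (PySem.List.pySet? xs i v).map (List.map f) := by
  simp only [PySem.List.pySet?, List.length_map]
  cases PySem.List.pyIdx? xs.length i <;> simp [List.map_set]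

-- find through a negative (wrapped) index
theorem rootGo_eq' {N : Nat} {reps : List Int} {x p : Int} (hN : 1 ≤ N)
    (h : PySem.List.pyGet? reps x = some p) :
    rootGo N reps x = if p = x then some x else rootGo (N - 1) reps p := by
  cases N with
  | zero => omega
  | succ f => simpa using rootGo_eq h

theorem ufFind_eq' {N : Nat} {reps : List Int} {x p : Int} (hN : 1 ≤ N)
    (h : PySem.List.pyGet? reps x = some p) :
    ufFind N reps x =
      if p ≠ x then
        match ufFind (N - 1) reps p with
        | none => none
        | some (reps1, r) =>
          match PySem.List.pySet? reps1 x r with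
          | none => none
          | some reps2 => some (reps2, r)
      else some (reps, x) := by
  cases N with
  | zero => omega
  | succ f => simpa using ufFind_eq h

-- find through a negative (wrapped) index
theorem ufFind_neg {N : Nat} {reps : List Int} {x r : Int}
    (hE : EntOk N reps) (hC : ∃ d, Cert N reps d) (hN2 : 2 ≤ N)
    (hx0 : -(N : Int) ≤ x) (hx1 : x < 0)
    (h : rootGo N reps (x + N) = some r) :
    ∃ reps', ufFind N reps x = some (reps', r) ∧ EntOk N reps' ∧ (∃ d, Cert N reps' d) ∧
      (∀ y v, 0 ≤ y → Reach reps y v → Reach reps' y v) := by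
  have hxN : 0 ≤ x + (N : Int) ∧ x + (N : Int) < (N : Int) := by omega
  obtain ⟨p, hgp, hp0, hp1⟩ := entOk_get_some hE hxN.1 hxN.2
  have hg : PySem.List.pyGet? reps x = some p := by
    rw [pyGet?_wrap (by rw [hE.1]; omega) hx1, hE.1]
    exact hgp
  have hpx : p ≠ x := by omega
  have hrg : rootGo (N - 1) reps p = some r := by
    rw [rootGo_eq' (by omega) hgp] at h
    by_cases hpeq : p = x + (N : Int)
    · rw [if_pos hpeq] at h
      obtain rfl := Option.some_inj.mp h
      rw [← hpeq]
      have h1 : rootGo 1 reps p = some p := by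
        rw [show (1 : Nat) = 0 + 1 from rfl, rootGo_eq (by rw [hpeq]; exact hgp)]
        simp [hpeq]
      exact rootGo_mono h1 (by omega)
    · rw [if_neg hpeq] at h
      exact h
  obtain ⟨reps1, heq1, hE1, hC1, P1⟩ := ufFind_go (N - 1) reps p r hE hC hp0 hp1 hrg
  have hreach1 : Reach reps1 (x + N) r := P1 _ r (by omega) ⟨N, h⟩
  have hr : 0 ≤ r ∧ r < (N : Int) := by
    rcases rootGo_val_mem h with h' | hmem
    · omega
    · exact hE.2 r hmem
  have hset : PySem.List.pySet? reps1 x r = some (reps1.set (x + (N : Int)).toNat r) := by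
    rw [pySet?_wrap r (by rw [hE1.1]; omega) hx1, hE1.1]
    exact pySet?_nonneg_lt r (by omega) (by rw [hE1.1]; omega)
  obtain ⟨d1, hd1⟩ := hC1
  refine ⟨reps1.set (x + (N : Int)).toNat r, ?_, set_root_entOk hE1 hr.1 hr.2,
    ⟨d1, set_root_cert hE1 hd1 (by omega) (by omega) hreach1⟩, ?_⟩
  · rw [ufFind_eq' (by omega) hg]
    simp [hpx, heq1, hset]
  · intro y v hy0 hv
    obtain ⟨g, hgv⟩ := P1 y v hy0 hv
    exact ⟨g, set_root_preserve hE1 (by omega) (by omega) hreach1 g y v hy0 hgv⟩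

theorem ufUnion_spec {N : Nat} {reps : List Int} {v1 v2 rt1 rt2 : Int}
    (hE : EntOk N reps) (hC : ∃ d, Cert N reps d) (hN2 : 2 ≤ N)
    (h10 : -(N : Int) ≤ v1) (h11 : v1 < (N : Int)) (h20 : 0 ≤ v2) (h21 : v2 < (N : Int))
    (hr1 : Reach reps (wrapNode N v1) rt1) (hr2 : Reach reps v2 rt2) :
    ∃ reps'', ufUnion reps v1 v2 = some reps'' ∧ EntOk N reps'' ∧ (∃ d, Cert N reps'' d) ∧
      ∀ y w, 0 ≤ y → Reach reps y w → Reach reps'' y (if w = rt1 then rt2 else w) := by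
  obtain ⟨d, hd⟩ := hC
  obtain ⟨rt2', h2'⟩ := rootGo_of_cert hE hd h20 h21
  rw [show rt2' = rt2 from reach_det ⟨N, h2'⟩ hr2] at h2'
  obtain ⟨reps1, heq1, hE1, hC1, P1⟩ := ufFind_go N reps v2 rt2 hE ⟨d, hd⟩ h20 h21 h2'
  have hw1 : 0 ≤ wrapNode N v1 ∧ wrapNode N v1 < (N : Int) := by
    unfold wrapNode; split <;> omega
  have hrt1r : 0 ≤ rt1 ∧ rt1 < (N : Int) := by
    obtain ⟨f, hf⟩ := hr1
    rcases rootGo_val_mem hf with rfl | hmem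
    · exact hw1
    · exact hE.2 rt1 hmem
  have hrt2r : 0 ≤ rt2 ∧ rt2 < (N : Int) := by
    rcases rootGo_val_mem h2' with rfl | hmem
    · exact ⟨h20, h21⟩
    · exact hE.2 rt2 hmem
  obtain ⟨d1, hd1⟩ := hC1
  obtain ⟨rt1', h1'⟩ := rootGo_of_cert hE1 hd1 hw1.1 hw1.2
  rw [show rt1' = rt1 from reach_det ⟨N, h1'⟩ (P1 _ rt1 hw1.1 hr1)] at h1'
  have hfind1 : ∃ reps2, ufFind N reps1 v1 = some (reps2, rt1) ∧ EntOk N reps2 ∧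
      (∃ d, Cert N reps2 d) ∧ (∀ y v, 0 ≤ y → Reach reps1 y v → Reach reps2 y v) := by
    by_cases hv1 : 0 ≤ v1
    · have hww : wrapNode N v1 = v1 := by unfold wrapNode; split <;> omega
      rw [hww] at h1'
      exact ufFind_go N reps1 v1 rt1 hE1 ⟨d1, hd1⟩ hv1 h11 h1'
    · have hww : wrapNode N v1 = v1 + N := by unfold wrapNode; split <;> omega
      rw [hww] at h1'
      exact ufFind_neg hE1 ⟨d1, hd1⟩ hN2 h10 (by omega) h1'
  obtain ⟨reps2, heq2, hE2, hC2, P2⟩ := hfind1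
  have hroot1 : PySem.List.pyGet? reps2 rt1 = some rt1 := by
    obtain ⟨f, hf⟩ := hr1
    have hrr : Reach reps rt1 rt1 := reach_root (rootGo_isRoot hf)
    obtain ⟨g, hgv⟩ := P2 rt1 rt1 hrt1r.1 (P1 rt1 rt1 hrt1r.1 hrr)
    exact rootGo_isRoot hgv
  have hroot2 : PySem.List.pyGet? reps2 rt2 = some rt2 := by
    have hrr : Reach reps rt2 rt2 := reach_root (rootGo_isRoot h2')
    obtain ⟨g, hgv⟩ := P2 rt2 rt2 hrt2r.1 (P1 rt2 rt2 hrt2r.1 hrr)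
    exact rootGo_isRoot hgv
  have hset : PySem.List.pySet? reps2 rt1 rt2 = some (reps2.set rt1.toNat rt2) :=
    pySet?_nonneg_lt rt2 hrt1r.1 (by rw [hE2.1]; omega)
  obtain ⟨d2, hd2⟩ := hC2
  refine ⟨reps2.set rt1.toNat rt2, ?_, set_root_entOk hE2 hrt2r.1 hrt2r.2,
    hang_cert hE2 hd2 hrt1r.1 hrt1r.2 hrt2r.1 hroot1 hroot2, ?_⟩
  · simp [ufUnion, hE.1, heq1, hE1.1, heq2, hset]
  · intro y w hy0 hw
    obtain ⟨g, hgv⟩ := P2 y w hy0 (P1 y w hy0 hw)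
    exact hang_reach hE2 hrt1r.1 hrt1r.2 hrt2r.1 hrt2r.2 hroot1 hroot2 g y w hy0 hgv

def InvAB (N : Nat) (reps comp : List Int) : Prop :=
  EntOk N reps ∧ (∃ d, Cert N reps d) ∧ comp.length = N ∧
  ∀ k : Int, 0 ≤ k → k < (N : Int) → ∃ w, Reach reps k w ∧ PySem.List.pyGet? comp k = some w

theorem merge_step {N : Nat} {reps comp : List Int} {a b : Int}
    (hI : InvAB N reps comp) (hN2 : 2 ≤ N)
    (ha0 : -(N : Int) ≤ a) (ha1 : a < (N : Int)) (hb0 : 0 ≤ b) (hb1 : b < (N : Int)) :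
    ∃ reps' comp', ufUnion reps a b = some reps' ∧ relabelled comp a b = some comp' ∧ InvAB N reps' comp' := by
  obtain ⟨hE, hC, hcl, hgap⟩ := hI
  have hwa : 0 ≤ wrapNode N a ∧ wrapNode N a < (N : Int) := by unfold wrapNode; split <;> omega
  obtain ⟨ra, hra, hgannn⟩ := hgap (wrapNode N a) hwa.1 hwa.2
  have hga : PySem.List.pyGet? comp a = some ra := by
    by_cases hneg : a < 0
    · rw [pyGet?_wrap (by rw [hcl]; omega) hneg, hcl]
      have : wrapNode N a = a + N := by unfold wrapNode; split <;> omega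
      rwa [this] at hgannn
    · have : wrapNode N a = a := by unfold wrapNode; split <;> omega
      rwa [this] at hgannn
  obtain ⟨rb, hrb, hgb⟩ := hgap b hb0 hb1
  obtain ⟨reps', hueq, hE', hC', P⟩ := ufUnion_spec hE hC hN2 ha0 ha1 hb0 hb1 hra hrb
  by_cases hab : ra = rb
  · refine ⟨reps', comp, hueq, ?_, hE', hC', hcl, ?_⟩
    · simp [relabelled, hga, hgb, hab]
    · intro k hk0 hk1
      obtain ⟨w, hw, hgw⟩ := hgap k hk0 hk1
      refine ⟨w, ?_, hgw⟩
      have hP := P k w hk0 hw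
      rwa [show (if w = ra then rb else w) = w by subst hab; split <;> simp_all] at hP
  · refine ⟨reps', comp.map (fun v => if v = ra then rb else v), hueq, ?_, hE', hC', by simp [hcl], ?_⟩
    · simp [relabelled, hga, hgb, hab]
    · intro k hk0 hk1
      obtain ⟨w, hw, hgw⟩ := hgap k hk0 hk1
      exact ⟨if w = ra then rb else w, P k w hk0 hw, by rw [pyGet?_map' _ _ _, hgw]; rfl⟩

-- the flood matrix and B's wet matrix
def wetOf (flood : List (List Int)) : List (List Bool) := flood.map (List.map (fun v => v == 1))

def GridOk (rows cols : Int) (g : List (List Int)) : Prop :=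
  g.length = rows.toNat ∧ ∀ row ∈ g, row.length = cols.toNat

theorem wetSet_comm (flood : List (List Int)) (r c : Int) :
    wetSet (wetOf flood) r c = (floodWrite flood r c 1).map wetOf := by
  unfold wetSet floodWrite wetOf
  rw [pyGet?_map']
  cases hg : PySem.List.pyGet? flood r with
  | none => simp
  | some rowl =>
    simp only [Option.map_some, Option.bind_some]
    rw [show true = ((1 : Int) == 1) from rfl, pySet?_map]
    cases hs : PySem.List.pySet? rowl c 1 with
    | none => simp
    | some rowl' =>
      simp only [Option.map_some, Option.bind_some]
      rw [pySet?_map]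

theorem floodRead_eq {flood : List (List Int)} {r : Int} {rowl : List Int}
    (h : PySem.List.pyGet? flood r = some rowl) (c : Int) :
    floodRead flood r c = PySem.List.pyGet? rowl c := by
  simp [floodRead, h]

theorem floodWrite_ok {rows cols : Int} {flood : List (List Int)} {r0 c0 : Int}
    (hG : GridOk rows cols flood)
    (hr : -rows ≤ r0 ∧ r0 < rows) (hc : -cols ≤ c0 ∧ c0 < cols) :
    ∃ flood1, floodWrite flood r0 c0 1 = some flood1 ∧ GridOk rows cols flood1 := by
  obtain ⟨hlen, hrows⟩ := hG
  have hr' : 0 < rows := by omega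
  have hrowget : ∃ rowl, PySem.List.pyGet? flood r0 = some rowl ∧ rowl ∈ flood := by
    by_cases hneg : r0 < 0
    · rw [pyGet?_wrap (by rw [hlen]; omega) hneg]
      refine ⟨_, pyGet?_nonneg_lt (by rw [hlen]; omega) (by rw [hlen]; omega), List.getElem_mem _⟩
    · refine ⟨_, pyGet?_nonneg_lt (by omega) (by rw [hlen]; omega), List.getElem_mem _⟩
  obtain ⟨rowl, hrg, hmem⟩ := hrowget
  have hrl : rowl.length = cols.toNat := hrows rowl hmem
  have hrowset : ∃ rowl', PySem.List.pySet? rowl c0 1 = some rowl' ∧ rowl'.length = cols.toNat := by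
    by_cases hneg : c0 < 0
    · rw [pySet?_wrap 1 (by rw [hrl]; omega) hneg]
      refine ⟨_, pySet?_nonneg_lt 1 (by rw [hrl]; omega) (by rw [hrl]; omega), by simp [hrl]⟩
    · refine ⟨_, pySet?_nonneg_lt 1 (by omega) (by rw [hrl]; omega), by simp [hrl]⟩
  obtain ⟨rowl', hsr, hrl'⟩ := hrowset
  have houtset : ∃ flood1, PySem.List.pySet? flood r0 rowl' = some flood1 ∧
      flood1.length = rows.toNat ∧ ∀ row ∈ flood1, row.length = cols.toNat := by
    have hmemset : ∀ (k : Nat) (fl : List (List Int)), fl = flood.set k rowl' →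
        ∀ row ∈ fl, row.length = cols.toNat := by
      intro k fl hfl row hrow
      rw [hfl] at hrow
      rcases List.mem_or_eq_of_mem_set hrow with h | rfl
      · exact hrows row h
      · exact hrl'
    by_cases hneg : r0 < 0
    · rw [pySet?_wrap rowl' (by rw [hlen]; omega) hneg]
      exact ⟨_, pySet?_nonneg_lt rowl' (by rw [hlen]; omega) (by rw [hlen]; omega),
        by simp [hlen], hmemset _ _ rfl⟩
    · exact ⟨_, pySet?_nonneg_lt rowl' (by omega) (by rw [hlen]; omega),
        by simp [hlen], hmemset _ _ rfl⟩
  obtain ⟨flood1, hso, hl1, hm1⟩ := houtset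
  exact ⟨flood1, by simp [floodWrite, hrg, hsr, hso], hl1, hm1⟩

theorem floodRead_ok {rows cols : Int} {flood : List (List Int)} {r c : Int}
    (hG : GridOk rows cols flood) (hr : 0 ≤ r ∧ r < rows) (hc : 0 ≤ c ∧ c < cols) :
    ∃ v, floodRead flood r c = some v := by
  obtain ⟨hlen, hrows⟩ := hG
  have hrg := pyGet?_nonneg_lt (xs := flood) (i := r) hr.1 (by rw [hlen]; omega)
  rw [floodRead_eq hrg]
  exact ⟨_, pyGet?_nonneg_lt hc.1 (by rw [hrows _ (List.getElem_mem _)]; omega)⟩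

theorem within_bounds_iff {row col rows cols : Int} :
    within_bounds row col rows cols = true ↔ (0 ≤ row ∧ row < rows ∧ 0 ≤ col ∧ col < cols) := by
  unfold within_bounds
  split_ifs with h1 h2
  · simp; omega
  · simp; omega
  · simp; omega

-- the B-side guard agrees with A's bounds test + flood read, on a well-shaped grid
theorem wetAt_eq {rows cols : Int} {flood : List (List Int)} {p : Int × Int} {v : Int}
    (hG : GridOk rows cols flood)
    (hb : 0 ≤ p.1 ∧ p.1 < rows ∧ 0 ≤ p.2 ∧ p.2 < cols)
    (hv : floodRead flood p.1 p.2 = some v) :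
    wetAt rows cols (wetOf flood) p = (v == 1) := by
  obtain ⟨hlen, hrows⟩ := hG
  have hr : p.1.toNat < flood.length := by rw [hlen]; omega
  have hget : PySem.List.pyGet? flood p.1 = some (flood[p.1.toNat]'hr) :=
    pyGet?_nonneg_lt hb.1 (by rw [hlen]; push_cast; omega)
  rw [floodRead_eq hget] at hv
  have hrowlen : (flood[p.1.toNat]'hr).length = cols.toNat := hrows _ (List.getElem_mem _)
  have hc : p.2.toNat < (flood[p.1.toNat]'hr).length := by rw [hrowlen]; omega
  have hv2 : PySem.List.pyGet? (flood[p.1.toNat]'hr) p.2 = some ((flood[p.1.toNat]'hr)[p.2.toNat]'hc) :=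
    pyGet?_nonneg_lt hb.2.2.1 (by rw [hrowlen]; push_cast; omega)
  rw [hv2] at hv
  obtain rfl := Option.some_inj.mp hv
  unfold wetAt
  rw [decide_eq_true hb.1, decide_eq_true hb.2.1, decide_eq_true hb.2.2.1, decide_eq_true hb.2.2.2]
  simp only [Bool.true_and]
  have h1 : p.1.toNat < (wetOf flood).length := by simpa [wetOf] using hr
  rw [List.getD_eq_getElem _ _ h1]
  have h2 : (wetOf flood)[p.1.toNat]'h1 = (flood[p.1.toNat]'hr).map (fun v => v == 1) := by
    simp [wetOf]
  rw [h2]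
  have h3 : p.2.toNat < ((flood[p.1.toNat]'hr).map (fun v => v == 1)).length := by simpa using hc
  rw [List.getD_eq_getElem _ _ h3]
  simp

theorem wetAt_oob {rows cols : Int} {wet : List (List Bool)} {p : Int × Int}
    (h : ¬ (0 ≤ p.1 ∧ p.1 < rows ∧ 0 ≤ p.2 ∧ p.2 < cols)) :
    wetAt rows cols wet p = false := by
  unfold wetAt
  by_cases h1 : 0 ≤ p.1 <;> by_cases h2 : p.1 < rows <;> by_cases h3 : 0 ≤ p.2 <;>
    by_cases h4 : p.2 < cols <;> simp_all

theorem idx_bounds {r c rows cols : Int} (hr : 0 ≤ r ∧ r < rows) (hc : 0 ≤ c ∧ c < cols) :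
    0 ≤ r * cols + c + 1 ∧ r * cols + c + 1 < rows * cols + 2 := by
  have h1 : 0 ≤ r * cols := mul_nonneg hr.1 (by omega)
  have h2 : r * cols ≤ (rows - 1) * cols :=
    mul_le_mul_of_nonneg_right (by omega) (by omega)
  constructor
  · omega
  · nlinarith

theorem idx_upper {r0 c0 rows cols : Int} (hr : r0 < rows) (hc : c0 < cols) (hc1 : 1 ≤ cols) :
    r0 * cols + c0 + 1 ≤ rows * cols := by
  have h2 : r0 * cols ≤ (rows - 1) * cols :=
    mul_le_mul_of_nonneg_right (by omega) (by omega)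
  nlinarith

-- A's per-direction union loop against B's fold of relabellings over the neighbour target list
theorem nb_align {N : Nat} {rows cols : Int} {flood1 : List (List Int)} {r0 c0 : Int}
    (hN : (N : Int) = rows * cols + 2) (hN2 : 2 ≤ N)
    (hG : GridOk rows cols flood1)
    (hrB : -rows ≤ r0 ∧ r0 < rows) (hcB : -cols ≤ c0 ∧ c0 < cols) (hcols : 1 ≤ cols)
    (hi : -(N : Int) ≤ r0 * cols + c0 + 1) :
    ∀ (ds : List (Int × Int)) (reps comp : List Int), InvAB N reps comp →
      ∃ reps' comp',
        ds.foldl (dirStep rows cols flood1 r0 c0) (some reps) = some reps' ∧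
        (((ds.map (fun d => (r0 + d.1, c0 + d.2))).filter (wetAt rows cols (wetOf flood1))).map
            (fun p => p.1 * cols + p.2 + 1)).foldl
            (fun acc t => acc.bind fun cm => relabelled cm (r0 * cols + c0 + 1) t) (some comp)
          = some comp' ∧
        InvAB N reps' comp' := by
  intro ds
  induction ds with
  | nil => intro reps comp hI; exact ⟨reps, comp, rfl, rfl, hI⟩
  | cons d ds ih =>
    intro reps comp hI
    have e1 : find_index r0 c0 cols = r0 * cols + c0 + 1 := by unfold find_index; ring
    have e2 : find_index (r0 + d.1) (c0 + d.2) cols = (r0 + d.1) * cols + (c0 + d.2) + 1 := by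
      unfold find_index; ring
    have hia : -(N : Int) ≤ r0 * cols + c0 + 1 ∧ r0 * cols + c0 + 1 < (N : Int) := by
      have := idx_upper hrB.2 hcB.2 hcols
      omega
    by_cases hb : 0 ≤ r0 + d.1 ∧ r0 + d.1 < rows ∧ 0 ≤ c0 + d.2 ∧ c0 + d.2 < cols
    · have hwb : within_bounds (r0 + d.1) (c0 + d.2) rows cols = true := within_bounds_iff.mpr hb
      obtain ⟨v, hrd⟩ := floodRead_ok hG ⟨hb.1, hb.2.1⟩ ⟨hb.2.2.1, hb.2.2.2⟩
      have hwa : wetAt rows cols (wetOf flood1) (r0 + d.1, c0 + d.2) = (v == 1) :=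
        wetAt_eq hG hb hrd
      have hbi := idx_bounds ⟨hb.1, hb.2.1⟩ ⟨hb.2.2.1, hb.2.2.2⟩
      by_cases hv : v = 1
      · obtain ⟨reps', comp', hu, hbm, hI'⟩ := merge_step (a := r0 * cols + c0 + 1)
          (b := (r0 + d.1) * cols + (c0 + d.2) + 1) hI hN2
          hia.1 hia.2 (by omega) (by omega)
        obtain ⟨reps'', comp'', hA2, hB2, hI''⟩ := ih reps' comp' hI'
        refine ⟨reps'', comp'', ?_, ?_, hI''⟩
        · rw [List.foldl_cons]
          have hA1 : dirStep rows cols flood1 r0 c0 (some reps) d = some reps' := by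
            simp [dirStep, hwb, hrd, hv, e1, e2, hu]
          rw [hA1]; exact hA2
        · simp only [List.map_cons, List.filter_cons, hwa, hv]
          simp only [beq_self_eq_true, if_true, List.map_cons, List.foldl_cons,
            Option.bind_some, hbm]
          exact hB2
      · obtain ⟨reps'', comp'', hA2, hB2, hI''⟩ := ih reps comp hI
        refine ⟨reps'', comp'', ?_, ?_, hI''⟩
        · rw [List.foldl_cons]
          have hA1 : dirStep rows cols flood1 r0 c0 (some reps) d = some reps := by
            simp [dirStep, hwb, hrd, hv]
          rw [hA1]; exact hA2
        · simp only [List.map_cons, List.filter_cons, hwa]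
          rw [if_neg (by simp [hv])]
          exact hB2
    · have hwb : within_bounds (r0 + d.1) (c0 + d.2) rows cols = false := by
        rw [← Bool.not_eq_true]
        intro hcon
        exact hb (within_bounds_iff.mp hcon)
      have hwa : wetAt rows cols (wetOf flood1) (r0 + d.1, c0 + d.2) = false :=
        wetAt_oob hb
      obtain ⟨reps'', comp'', hA2, hB2, hI''⟩ := ih reps comp hI
      refine ⟨reps'', comp'', ?_, ?_, hI''⟩
      · rw [List.foldl_cons]
        have hA1 : dirStep rows cols flood1 r0 c0 (some reps) d = some reps := by
          simp [dirStep, hwb]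
        rw [hA1]; exact hA2
      · simp only [List.map_cons, List.filter_cons, hwa]
        rw [if_neg (by simp)]
        exact hB2

-- A's conditional boundary union against B's fold over the conditional singleton target
theorem opt_relab_align {N : Nat} {reps comp : List Int} {aA i b : Int}
    (cond : Prop) [Decidable cond] (hI : InvAB N reps comp) (hN2 : 2 ≤ N) (hab : aA = i)
    (ha : -(N : Int) ≤ i ∧ i < (N : Int)) (hb : 0 ≤ b ∧ b < (N : Int)) :
    ∃ reps' comp', (if cond then ufUnion reps aA b else some reps) = some reps' ∧
      (if cond then [b] else []).foldl (fun acc t => acc.bind fun cm => relabelled cm i t)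
        (some comp) = some comp' ∧
      InvAB N reps' comp' := by
  subst hab
  by_cases hc : cond
  · obtain ⟨reps', comp', hu, hm, hI'⟩ := merge_step hI hN2 ha.1 ha.2 hb.1 hb.2
    exact ⟨reps', comp', by rw [if_pos hc]; exact hu,
      by rw [if_pos hc]; simp only [List.foldl_cons, List.foldl_nil, Option.bind_some]; exact hm, hI'⟩
  · exact ⟨reps, comp, by rw [if_neg hc], by rw [if_neg hc]; rfl, hI⟩

theorem find_align {N : Nat} {reps comp : List Int} {x w : Int}
    (hI : InvAB N reps comp) (hx : 0 ≤ x ∧ x < (N : Int))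
    (hw : PySem.List.pyGet? comp x = some w) :
    ∃ reps', ufFind reps.length reps x = some (reps', w) ∧ InvAB N reps' comp ∧
      (∀ y v, 0 ≤ y → Reach reps y v → Reach reps' y v) := by
  obtain ⟨hE, ⟨d, hd⟩, hcl, hgap⟩ := hI
  obtain ⟨w', hrw', hgw'⟩ := hgap x hx.1 hx.2
  have hww : w = w' := by rw [hw] at hgw'; exact Option.some_inj.mp hgw'
  rw [← hww] at hrw'
  obtain ⟨rt, hrt⟩ := rootGo_of_cert hE hd hx.1 hx.2
  rw [show rt = w from reach_det ⟨N, hrt⟩ hrw'] at hrt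
  obtain ⟨reps', heq, hE', hC', P⟩ := ufFind_go N reps x w hE ⟨d, hd⟩ hx.1 hx.2 hrt
  refine ⟨reps', by rw [hE.1]; exact heq, ⟨hE', hC', hcl, ?_⟩, P⟩
  intro k hk0 hk1
  obtain ⟨u, hu, hgu⟩ := hgap k hk0 hk1
  exact ⟨u, P k u hk0 hu, hgu⟩

theorem loop_align {N : Nat} {rows cols : Int}
    (hN : (N : Int) = rows * cols + 2) (hrows : 1 ≤ rows) (hcols : 1 ≤ cols) :
    ∀ (cells : List (Int × Int)) (days : Int) (flood : List (List Int)) (reps comp : List Int),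
      (∀ p ∈ cells, 1 - rows ≤ p.1 ∧ p.1 ≤ rows ∧ 1 - cols ≤ p.2 ∧ p.2 ≤ cols ∧
        -(rows * cols + 2) ≤ (p.1 - 1) * cols + (p.2 - 1) + 1) →
      GridOk rows cols flood → InvAB N reps comp →
      ∃ v, loopA rows cols (cells.map (fun p => (p.1 - 1, p.2 - 1))) days flood reps = some v ∧
           runDays rows cols cells days (wetOf flood) comp = some v := by
  have hrc : 1 ≤ rows * cols := by
    have h := mul_le_mul hrows hcols (by omega) (by omega)
    simpa using h
  have hN2 : 2 ≤ N := by omega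
  intro cells
  induction cells with
  | nil => intro days flood reps comp _ _ _; exact ⟨days, rfl, rfl⟩
  | cons p rest ih =>
    obtain ⟨r, c⟩ := p
    intro days flood reps comp hcell hG hI
    have hb := hcell (r, c) (List.mem_cons_self)
    simp only at hb
    have hr01 : -rows ≤ r - 1 ∧ r - 1 < rows := ⟨by omega, by omega⟩
    have hc01 : -cols ≤ c - 1 ∧ c - 1 < cols := ⟨by omega, by omega⟩
    obtain ⟨flood1, hFW, hG1⟩ := floodWrite_ok hG hr01 hc01
    have hBW : wetSet (wetOf flood) (r - 1) (c - 1) = some (wetOf flood1) := by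
      rw [wetSet_comm, hFW]; rfl
    have hilow : -(N : Int) ≤ (r - 1) * cols + (c - 1) + 1 := by
      have := hb.2.2.2.2
      omega
    obtain ⟨reps1, comp1, hA1, hB1, hI1⟩ :=
      nb_align hN hN2 hG1 hr01 hc01 hcols hilow water_directions reps comp hI
    have hiab : -(N : Int) ≤ (r - 1) * cols + (c - 1) + 1 ∧ (r - 1) * cols + (c - 1) + 1 < (N : Int) := by
      have := idx_upper hr01.2 hc01.2 hcols
      omega
    obtain ⟨reps2, comp2, hM2A, hM2B, hI2⟩ :=
      opt_relab_align (N := N) (c - 1 = 0) hI1 hN2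
        (show find_index (r - 1) (c - 1) cols = (r - 1) * cols + (c - 1) + 1 by unfold find_index; ring)
        hiab (b := 0) (by omega)
    obtain ⟨reps3, comp3, hM3A, hM3B, hI3⟩ :=
      opt_relab_align (N := N) (c - 1 = cols - 1) hI2 hN2
        (show find_index (r - 1) (c - 1) cols = (r - 1) * cols + (c - 1) + 1 by unfold find_index; ring)
        hiab (b := rows * cols + 1) (by omega)
    obtain ⟨hE3, hC3, hcl3, hgap3⟩ := hI3
    obtain ⟨w0, hrw0, hgw0⟩ := hgap3 0 (by omega) (by omega)
    obtain ⟨w1, hrw1, hgw1⟩ := hgap3 (rows * cols + 1) (by omega) (by omega)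
    obtain ⟨reps4, hF4, hI4, P4⟩ := find_align ⟨hE3, hC3, hcl3, hgap3⟩ (x := 0) (by omega) hgw0
    obtain ⟨reps5, hF5, hI5, P5⟩ :=
      find_align hI4 (x := rows * cols + 1) (by omega) hgw1
    have hTgts : (merge_targets rows cols (wetOf flood1) (r - 1) (c - 1)).foldl
        (fun acc t => acc.bind fun cm => relabelled cm ((r - 1) * cols + (c - 1) + 1) t)
        (some comp) = some comp3 := by
      unfold merge_targets
      rw [show dirs8 = water_directions from rfl]
      rw [List.foldl_append, List.foldl_append, hB1, hM2B, hM3B]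
    by_cases hw : w0 = w1
    · refine ⟨days, ?_, ?_⟩
      · simp only [List.map_cons, loopA, hFW, hA1, hM2A, hM3A, hF4, hF5]
        simp [hw]
      · simp only [runDays, hBW, Option.bind_some, hTgts, hgw0, hgw1]
        simp [hw]
    · obtain ⟨v, hva, hvb⟩ := ih (days + 1) flood1 reps5 comp3
        (fun q hq => hcell q (List.mem_cons_of_mem _ hq)) hG1 hI5
      refine ⟨v, ?_, ?_⟩
      · simp only [List.map_cons, loopA, hFW, hA1, hM2A, hM3A, hF4, hF5]
        simpa [hw] using hva
      · simp only [runDays, hBW, Option.bind_some, hTgts, hgw0, hgw1]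
        simpa [hw] using hvb

theorem init_inv {rows cols : Int} (hN2 : 0 ≤ rows * cols + 2) :
    InvAB (rows * cols + 2).toNat (PySem.List.pyRange 0 (rows * cols + 2) 1)
      ((List.range (rows * cols + 2).toNat).map Int.ofNat) := by
  have hN : (((rows * cols + 2).toNat : Nat) : Int) = rows * cols + 2 := Int.toNat_of_nonneg hN2
  have hcomp : (List.range (rows * cols + 2).toNat).map Int.ofNat =
      PySem.List.pyRange 0 (rows * cols + 2) 1 := by
    rw [PySem.List.pyRange_one, sub_zero]
    exact List.map_congr_left (fun a _ => by simp)
  rw [hcomp]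
  have hlen : (PySem.List.pyRange 0 (rows * cols + 2) 1).length = (rows * cols + 2).toNat := by
    rw [PySem.List.length_pyRange_one]; omega
  have hget : ∀ x : Int, 0 ≤ x → x < ((rows * cols + 2).toNat : Int) →
      PySem.List.pyGet? (PySem.List.pyRange 0 (rows * cols + 2) 1) x = some x := by
    intro x hx0 hx1
    have hxl : x < ((PySem.List.pyRange 0 (rows * cols + 2) 1).length : Int) := by
      rw [hlen]; omega
    rw [pyGet?_nonneg_lt hx0 hxl]
    congr 1
    rw [PySem.List.getElem_pyRange_one]
    omega
  refine ⟨⟨hlen, ?_⟩, ⟨fun _ => 0, ?_⟩, hlen, ?_⟩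
  · intro p hp
    have := PySem.List.mem_pyRange_one.mp hp
    omega
  · intro x p hx0 hx1 hg
    rw [hget x hx0 hx1] at hg
    exact Or.inl (Option.some_inj.mp hg).symm
  · intro k hk0 hk1
    exact ⟨k, reach_root (hget k hk0 hk1), hget k hk0 hk1⟩

theorem wet0_eq {rows cols : Int} :
    List.replicate rows.toNat (List.replicate cols.toNat false) =
      wetOf ((PySem.List.pyRange 0 rows 1).map (fun _ => (PySem.List.pyRange 0 cols 1).map (fun _ => (0 : Int)))) := by
  unfold wetOf
  rw [List.map_map]
  have h1 : ∀ x : Int, (List.map (fun v => v == 1) ∘ fun _ : Int => (PySem.List.pyRange 0 cols 1).map (fun _ => (0 : Int))) x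
      = List.replicate cols.toNat false := by
    intro x
    simp only [Function.comp_apply, List.map_map]
    rw [show ((fun v => v == (1 : Int)) ∘ fun _ : Int => (0 : Int)) = Function.const Int false from rfl]
    rw [List.map_const, PySem.List.length_pyRange_one]
    congr 1
    omega
  rw [funext h1]
  rw [show (fun _ : Int => List.replicate cols.toNat false) = Function.const Int (List.replicate cols.toNat false) from rfl]
  rw [List.map_const, PySem.List.length_pyRange_one]
  congr 1
  omega

theorem grid0_ok {rows cols : Int} (hrows : 0 ≤ rows) (hcols : 0 ≤ cols) :
    GridOk rows cols ((PySem.List.pyRange 0 rows 1).map (fun _ => (PySem.List.pyRange 0 cols 1).map (fun _ => (0 : Int)))) := by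
  refine ⟨by simp [PySem.List.length_pyRange_one], ?_⟩
  intro row hrow
  obtain ⟨x, _, rfl⟩ := List.mem_map.mp hrow
  simp [PySem.List.length_pyRange_one]

theorem main_equiv (rows cols : Int) (w : List (Int × Int))
    (hpre : ∀ p ∈ w, 1 - rows ≤ p.1 ∧ p.1 ≤ rows ∧ 1 - cols ≤ p.2 ∧ p.2 ≤ cols ∧
      -(rows * cols + 2) ≤ (p.1 - 1) * cols + (p.2 - 1) + 1) :
    last_day_to_cross rows cols w = last_day_to_cross_alt rows cols w := by
  cases w with
  | nil => simp [last_day_to_cross, last_day_to_cross_alt, loopA, runDays]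
  | cons p rest =>
    have hp := hpre p (List.mem_cons_self)
    have hrows : 1 ≤ rows := by omega
    have hcols : 1 ≤ cols := by omega
    have hrc : 1 ≤ rows * cols := by
      have h := mul_le_mul hrows hcols (by omega) (by omega)
      simpa using h
    have hN : (((rows * cols + 2).toNat : Nat) : Int) = rows * cols + 2 :=
      Int.toNat_of_nonneg (by omega)
    obtain ⟨v, hA, hB⟩ := loop_align hN hrows hcols (p :: rest) 0
      ((PySem.List.pyRange 0 rows 1).map (fun _ => (PySem.List.pyRange 0 cols 1).map (fun _ => (0 : Int))))
      (PySem.List.pyRange 0 (rows * cols + 2) 1)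
      ((List.range (rows * cols + 2).toNat).map Int.ofNat)
      hpre (grid0_ok (by omega) (by omega)) (init_inv (by omega))
    simp only [last_day_to_cross, last_day_to_cross_alt]
    rw [hA, wet0_eq, hB]

-- ===== VERDICT (by name: the statement is the Claim_ definition above) =====
theorem last_day_to_cross_spec : Claim_equal_last_day_to_cross := by
  intro rows cols water_cells _hdom hpre
  unfold Spec_last_day_to_cross
  exact main_equiv rows cols water_cells hpre
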